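-- pv_equiv track=rewrite | github.com/KIMSEUNGGYU/PS | _python/baekjoon/9037.py | teacher
-- ===== SOURCE A (Python) =====
-- def teacher(N, candy):
--     tmp_lst = [0 for i in range(N)]
--     for idx in range(N):
--         if candy[idx] % 2: # 캔디에 나머지 값이 홀수면,
--             candy[idx] += 1
--         candy[idx] //= 2
--         tmp_lst[(idx+1)%N] = candy[idx]
--
--     for idx in range(N):
--         candy[idx] += tmp_lst[idx]
--     return candy
-- ===== SOURCE B (Python) =====
-- def teacher(N, candy):
--     if N <= 0:
--         return candy
--     prev = (candy[N - 1] + 1) // 2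
--     for i in range(N):
--         h = (candy[i] + 1) // 2
--         candy[i] = h + prev
--         prev = h
--     return candy
-- ===== Notes on version B (the rewrite author's own statement) =====
-- stated objective: simpler
-- what changed: B replaces A's two staged passes with a temp buffer (halve-and-push, then add) by one single pass carrying the predecessor's half in a rolling accumulator seeded from the last student, so no temporary list and no second loop exist.
import Mathlib
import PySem

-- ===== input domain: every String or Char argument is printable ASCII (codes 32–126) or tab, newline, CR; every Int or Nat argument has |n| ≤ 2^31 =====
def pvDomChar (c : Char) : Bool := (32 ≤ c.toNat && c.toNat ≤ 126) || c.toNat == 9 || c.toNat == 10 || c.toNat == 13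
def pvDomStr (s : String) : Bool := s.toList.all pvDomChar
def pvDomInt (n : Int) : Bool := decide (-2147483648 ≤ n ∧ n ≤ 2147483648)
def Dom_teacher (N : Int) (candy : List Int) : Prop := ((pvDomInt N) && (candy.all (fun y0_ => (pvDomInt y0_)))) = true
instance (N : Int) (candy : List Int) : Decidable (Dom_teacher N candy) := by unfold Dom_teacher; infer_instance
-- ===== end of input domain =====

-- B replaces A's two staged passes with a temp buffer (halve-and-push, then add) by ONE pass
-- that carries the predecessor's half in a rolling accumulator seeded from the last student;
-- no temporary list and no second loop (objective: simpler).  Both Pythons mutate `candy` in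
-- place the same way and return it; the theorems below are about the returned value.

-- ===== PORT A =====
-- candy[idx] += 1 if odd, then candy[idx] //= 2
def teacherHalve (c : Int) : Int :=
  PySem.Int.floordiv (if PySem.Int.mod c 2 ≠ 0 then c + 1 else c) 2

-- one iteration of A's first loop: update candy[idx], push it to tmp_lst[(idx+1)%N]
def teacherStep1 (N : Int) (st : List Int × List Int) (idx : Int) : List Int × List Int :=
  (PySem.List.pySetD st.1 idx (teacherHalve (PySem.List.pyGetD st.1 idx 0)),
   PySem.List.pySetD st.2 (PySem.Int.mod (idx + 1) N)
     (teacherHalve (PySem.List.pyGetD st.1 idx 0)))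

-- one iteration of A's second loop: candy[idx] += tmp_lst[idx]
def teacherStep2 (tmp : List Int) (c : List Int) (idx : Int) : List Int :=
  PySem.List.pySetD c idx (PySem.List.pyGetD c idx 0 + PySem.List.pyGetD tmp idx 0)

-- A's second loop over the state left by the first loop
def teacherPhase2 (N : Int) (st : List Int × List Int) : List Int :=
  (PySem.List.pyRange 0 N 1).foldl (teacherStep2 st.2) st.1

def teacher (N : Int) (candy : List Int) : List Int :=
  teacherPhase2 N
    ((PySem.List.pyRange 0 N 1).foldl (teacherStep1 N)
      (candy, (PySem.List.pyRange 0 N 1).map (fun _ => 0)))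

-- ===== PORT B =====
-- one iteration of B's single loop: h = (candy[i]+1)//2; candy[i] = h + prev; prev = h
def teacherAltStep (st : List Int × Int) (i : Int) : List Int × Int :=
  (PySem.List.pySetD st.1 i
     (PySem.Int.floordiv (PySem.List.pyGetD st.1 i 0 + 1) 2 + st.2),
   PySem.Int.floordiv (PySem.List.pyGetD st.1 i 0 + 1) 2)

def teacher_alt (N : Int) (candy : List Int) : List Int :=
  if N ≤ 0 then candy
  else
    ((PySem.List.pyRange 0 N 1).foldl teacherAltStep
      (candy, PySem.Int.floordiv (PySem.List.pyGetD candy (N - 1) 0 + 1) 2)).1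

-- ===== PRECONDITION & SPEC =====
-- A raises IndexError (candy[idx]) as soon as N exceeds len(candy); those inputs are excluded.
def Pre_teacher (N : Int) (candy : List Int) : Prop := N ≤ PySem.List.len candy
instance (N : Int) (candy : List Int) : Decidable (Pre_teacher N candy) := by
  unfold Pre_teacher; infer_instance

def pvWitness_teacher : Int × List Int := (3, [5, 2, 7])

def Spec_teacher (N : Int) (candy : List Int) (out : List Int) : Prop := out = teacher_alt N candy
instance (N : Int) (candy : List Int) (out : List Int) : Decidable (Spec_teacher N candy out) := by
  unfold Spec_teacher; infer_instance

-- ===== CLAIM (what is proved, stated in full; the proofs are below) =====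
def Claim_equal_teacher : Prop := ∀ (N : Int) (candy : List Int),
  Dom_teacher N candy → Pre_teacher N candy → Spec_teacher N candy (teacher N candy)

-- ===== LEMMAS AND PROOFS =====

-- the value both programs store: ceil(candy[j] / 2)
def pvHalf (candy : List Int) (j : Int) : Int :=
  PySem.Int.floordiv (PySem.List.pyGetD candy j 0 + 1) 2

lemma pv_teacherHalve (c : Int) : teacherHalve c = PySem.Int.floordiv (c + 1) 2 := by
  unfold teacherHalve
  rw [PySem.Int.mod_eq_emod_of_pos (by norm_num)]
  by_cases h : c % 2 = 0
  · rw [if_neg (by simpa using h), PySem.Int.floordiv_eq_ediv_of_pos (by norm_num),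
      PySem.Int.floordiv_eq_ediv_of_pos (by norm_num)]
    omega
  · rw [if_pos (by simpa using h)]

lemma pv_mod_small {a b : Int} (ha : 0 ≤ a) (h : a < b) : PySem.Int.mod a b = a := by
  rw [PySem.Int.mod_eq_emod_of_pos (by omega)]
  exact Int.emod_eq_of_lt ha h

lemma pv_mod_self {b : Int} (hb : 0 < b) : PySem.Int.mod b b = 0 := by
  rw [PySem.Int.mod_eq_emod_of_pos hb]; simp

-- invariant of a loop 'for i in range(k): c[i] = g(c[i], i)'
lemma pv_foldl_set_inv (f : List Int → Int → List Int) (g : Int → Int → Int)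
    (hf : ∀ c i, f c i = PySem.List.pySetD c i (g (PySem.List.pyGetD c i 0) i))
    (c : List Int) :
    ∀ (k : Nat), k ≤ c.length →
      ((PySem.List.pyRange 0 (k : Int) 1).foldl f c).length = c.length ∧
      ∀ j : Nat, j < c.length →
        PySem.List.pyGetD ((PySem.List.pyRange 0 (k : Int) 1).foldl f c) (j : Int) 0 =
          if j < k then g (PySem.List.pyGetD c (j : Int) 0) (j : Int)
          else PySem.List.pyGetD c (j : Int) 0 := by
  intro k
  induction k with
  | zero =>
    intro _
    rw [Nat.cast_zero, PySem.List.pyRange_one_eq_nil (le_refl 0), List.foldl_nil]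
    exact ⟨rfl, fun j hj => by simp⟩
  | succ k ih =>
    intro hk
    obtain ⟨ihlen, ihget⟩ := ih (by omega)
    have hsplit : PySem.List.pyRange 0 ((k + 1 : Nat) : Int) 1 =
        PySem.List.pyRange 0 (k : Int) 1 ++ [(k : Int)] := by
      push_cast
      exact PySem.List.pyRange_one_succ_right (by positivity)
    rw [hsplit, List.foldl_append]
    set r := (PySem.List.pyRange 0 (k : Int) 1).foldl f c with hr
    have hkr : k < r.length := by omega
    rw [show List.foldl f r [(k : Int)] = f r (k : Int) from by simp, hf]
    constructor
    · rw [PySem.List.length_pySetD]; omega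
    · intro j hj
      rw [PySem.List.pyGetD_pySetD_natCast r k j _ 0 hkr]
      have hrk : PySem.List.pyGetD r (k : Int) 0 = PySem.List.pyGetD c (k : Int) 0 := by
        rw [ihget k (by omega)]; simp
      by_cases hjk : j = k
      · subst hjk
        simp [hrk]
      · rw [if_neg hjk, ihget j hj]
        have : (j < k + 1) ↔ (j < k) := by omega
        simp [this]

-- invariant of A's first loop (N = n > 0, n ≤ len candy): after k iterations candy's first k
-- slots hold the halves, tmp's slots 1..k hold the pushed halves, slot 0 is written only last.
lemma pv_fold1_inv (candy : List Int) (n : Nat) (hn : 0 < n) (hlen : n ≤ candy.length)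
    (tmp0 : List Int) (h0len : tmp0.length = n)
    (h0get : ∀ j : Nat, j < n → PySem.List.pyGetD tmp0 (j : Int) 0 = 0) :
    ∀ (k : Nat), k ≤ n →
      (((PySem.List.pyRange 0 (k : Int) 1).foldl (teacherStep1 (n : Int)) (candy, tmp0)).1.length
          = candy.length) ∧
      (((PySem.List.pyRange 0 (k : Int) 1).foldl (teacherStep1 (n : Int)) (candy, tmp0)).2.length
          = n) ∧
      (∀ j : Nat, j < candy.length →
        PySem.List.pyGetD
            ((PySem.List.pyRange 0 (k : Int) 1).foldl (teacherStep1 (n : Int)) (candy, tmp0)).1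
            (j : Int) 0 =
          if j < k then pvHalf candy (j : Int) else PySem.List.pyGetD candy (j : Int) 0) ∧
      (∀ j : Nat, j < n →
        PySem.List.pyGetD
            ((PySem.List.pyRange 0 (k : Int) 1).foldl (teacherStep1 (n : Int)) (candy, tmp0)).2
            (j : Int) 0 =
          if j = 0 then (if k = n then pvHalf candy ((n : Int) - 1) else 0)
          else if j ≤ k then pvHalf candy ((j : Int) - 1) else 0) := by
  intro k
  induction k with
  | zero =>
    intro _
    rw [Nat.cast_zero, PySem.List.pyRange_one_eq_nil (le_refl 0), List.foldl_nil]
    refine ⟨rfl, h0len, fun j hj => by simp, ?_⟩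
    intro j hj
    rw [h0get j hj]
    by_cases hj0 : j = 0
    · rw [if_pos hj0, if_neg (by omega : ¬ (0 = n))]
    · rw [if_neg hj0, if_neg (by omega : ¬ (j ≤ 0))]
  | succ k ih =>
    intro hk
    obtain ⟨ih1, ih2, ihc, iht⟩ := ih (by omega)
    have hsplit : PySem.List.pyRange 0 ((k + 1 : Nat) : Int) 1 =
        PySem.List.pyRange 0 (k : Int) 1 ++ [(k : Int)] := by
      push_cast
      exact PySem.List.pyRange_one_succ_right (by positivity)
    rw [hsplit, List.foldl_append]
    set st := (PySem.List.pyRange 0 (k : Int) 1).foldl (teacherStep1 (n : Int)) (candy, tmp0)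
      with hst
    rw [show List.foldl (teacherStep1 (n : Int)) st [(k : Int)] =
        teacherStep1 (n : Int) st (k : Int) from by simp]
    have hklen : k < candy.length := by omega
    have hc0 : PySem.List.pyGetD st.1 (k : Int) 0 = PySem.List.pyGetD candy (k : Int) 0 := by
      rw [ihc k hklen]; simp
    have hval : teacherStep1 (n : Int) st (k : Int) =
        (PySem.List.pySetD st.1 (k : Int) (pvHalf candy (k : Int)),
         PySem.List.pySetD st.2 (PySem.Int.mod ((k : Int) + 1) (n : Int))
           (pvHalf candy (k : Int))) := by
      unfold teacherStep1
      rw [hc0, pv_teacherHalve]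
      rfl
    rw [hval]
    have hk1 : k < st.1.length := by omega
    refine ⟨by rw [PySem.List.length_pySetD]; omega,
            by rw [PySem.List.length_pySetD]; omega, ?_, ?_⟩
    · intro j hj
      rw [PySem.List.pyGetD_pySetD_natCast st.1 k j _ 0 hk1]
      by_cases hjk : j = k
      · subst hjk; simp
      · rw [if_neg hjk, ihc j hj]
        have : (j < k + 1) ↔ (j < k) := by omega
        simp [this]
    · intro j hj
      by_cases hwrap : k + 1 = n
      · -- last iteration: tmp_lst[(idx+1)%N] is tmp_lst[0]
        have hmod : PySem.Int.mod ((k : Int) + 1) (n : Int) = (((0 : Nat)) : Int) := by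
          rw [show ((k : Int) + 1) = (n : Int) from by exact_mod_cast hwrap, Nat.cast_zero]
          exact pv_mod_self (by exact_mod_cast hn)
        rw [hmod]
        have h0 : (0 : Nat) < st.2.length := by omega
        rw [PySem.List.pyGetD_pySetD_natCast st.2 0 j _ 0 h0]
        by_cases hj0 : j = 0
        · subst hj0
          rw [if_pos rfl, if_pos rfl, if_pos hwrap,
            show ((k : Int)) = (n : Int) - 1 from by omega]
        · rw [if_neg hj0, if_neg hj0, iht j hj, if_neg hj0,
            if_pos (by omega : j ≤ k), if_pos (by omega : j ≤ k + 1)]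
      · -- tmp_lst[(idx+1)%N] is tmp_lst[k+1]
        have hmod : PySem.Int.mod ((k : Int) + 1) (n : Int) = ((k + 1 : Nat) : Int) := by
          rw [show ((k : Int) + 1) = ((k + 1 : Nat) : Int) from by push_cast; ring]
          exact pv_mod_small (by positivity) (by exact_mod_cast (by omega : k + 1 < n))
        rw [hmod]
        have hk2 : k + 1 < st.2.length := by omega
        rw [PySem.List.pyGetD_pySetD_natCast st.2 (k + 1) j _ 0 hk2]
        by_cases hjk : j = k + 1
        · subst hjk
          rw [if_pos rfl, if_neg (by omega : ¬ (k + 1 = 0)),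
            if_pos (le_refl (k + 1)),
            show ((k + 1 : Nat) : Int) - 1 = ((k : Nat) : Int) from by push_cast; ring]
        · rw [if_neg hjk, iht j hj]
          by_cases hj0 : j = 0
          · rw [if_pos hj0, if_pos hj0, if_neg (by omega : ¬ (k = n)),
              if_neg (by omega : ¬ (k + 1 = n))]
          · rw [if_neg hj0, if_neg hj0]
            have : (j ≤ k + 1) ↔ (j ≤ k) := by omega
            simp [this]

-- pointwise value of teacher for N = n > 0
lemma pv_teacher_get (candy : List Int) (n : Nat) (hn : 0 < n) (hlen : n ≤ candy.length) :
    (teacher (n : Int) candy).length = candy.length ∧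
    ∀ j : Nat, j < candy.length →
      PySem.List.pyGetD (teacher (n : Int) candy) (j : Int) 0 =
        if j < n then
          pvHalf candy (j : Int) +
            (if j = 0 then pvHalf candy ((n : Int) - 1) else pvHalf candy ((j : Int) - 1))
        else PySem.List.pyGetD candy (j : Int) 0 := by
  unfold teacher teacherPhase2
  set tmp0 : List Int := (PySem.List.pyRange 0 (n : Int) 1).map (fun _ => 0) with htmp0
  have h0len : tmp0.length = n := by
    simp [htmp0, PySem.List.length_pyRange_one]
  have h0get : ∀ j : Nat, j < n → PySem.List.pyGetD tmp0 (j : Int) 0 = 0 := by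
    intro j hj
    rw [htmp0, PySem.List.pyGetD_map_pyRange (fun _ => (0:Int)) n j 0 hj]
  obtain ⟨h1, h2, hc, ht⟩ :=
    pv_fold1_inv candy n hn hlen tmp0 h0len h0get n (le_refl n)
  set st := (PySem.List.pyRange 0 (n : Int) 1).foldl (teacherStep1 (n : Int)) (candy, tmp0)
    with hst
  obtain ⟨h2len, h2get⟩ := pv_foldl_set_inv (teacherStep2 st.2)
    (fun v i => v + PySem.List.pyGetD st.2 i 0) (fun c i => rfl) st.1 n (by omega)
  constructor
  · rw [h2len]; omega
  · intro j hj
    have hj1 : j < st.1.length := by omega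
    rw [h2get j hj1]
    by_cases hjn : j < n
    · rw [if_pos hjn, hc j hj, if_pos hjn, ht j hjn]
      by_cases hj0 : j = 0
      · simp [hj0]
        exact fun h => absurd h (by omega)
      · simp [hjn, hj0, (by omega : j ≤ n)]
    · rw [if_neg hjn, hc j hj, if_neg hjn, if_neg hjn]

-- invariant of B's single loop: after k iterations the first k slots are finished and the
-- accumulator holds the half of the previous student (the last student before iteration 0)
lemma pv_foldB_inv (candy : List Int) (n : Nat) (hn : 0 < n) (hlen : n ≤ candy.length) :
    ∀ (k : Nat), k ≤ n →
      (((PySem.List.pyRange 0 (k : Int) 1).foldl teacherAltStep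
          (candy, pvHalf candy ((n : Int) - 1))).1.length = candy.length) ∧
      (((PySem.List.pyRange 0 (k : Int) 1).foldl teacherAltStep
          (candy, pvHalf candy ((n : Int) - 1))).2 =
        if k = 0 then pvHalf candy ((n : Int) - 1) else pvHalf candy ((k : Int) - 1)) ∧
      (∀ j : Nat, j < candy.length →
        PySem.List.pyGetD
            ((PySem.List.pyRange 0 (k : Int) 1).foldl teacherAltStep
              (candy, pvHalf candy ((n : Int) - 1))).1 (j : Int) 0 =
          if j < k then
            pvHalf candy (j : Int) +
              (if j = 0 then pvHalf candy ((n : Int) - 1) else pvHalf candy ((j : Int) - 1))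
          else PySem.List.pyGetD candy (j : Int) 0) := by
  intro k
  induction k with
  | zero =>
    intro _
    rw [Nat.cast_zero, PySem.List.pyRange_one_eq_nil (le_refl 0), List.foldl_nil]
    exact ⟨rfl, by simp, fun j hj => by simp⟩
  | succ k ih =>
    intro hk
    obtain ⟨ihlen, ihprev, ihget⟩ := ih (by omega)
    have hsplit : PySem.List.pyRange 0 ((k + 1 : Nat) : Int) 1 =
        PySem.List.pyRange 0 (k : Int) 1 ++ [(k : Int)] := by
      push_cast
      exact PySem.List.pyRange_one_succ_right (by positivity)
    rw [hsplit, List.foldl_append]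
    set st := (PySem.List.pyRange 0 (k : Int) 1).foldl teacherAltStep
      (candy, pvHalf candy ((n : Int) - 1)) with hst
    rw [show List.foldl teacherAltStep st [(k : Int)] = teacherAltStep st (k : Int) from by simp]
    have hklen : k < candy.length := by omega
    have hck : PySem.List.pyGetD st.1 (k : Int) 0 = PySem.List.pyGetD candy (k : Int) 0 := by
      rw [ihget k hklen]; simp
    have hval : teacherAltStep st (k : Int) =
        (PySem.List.pySetD st.1 (k : Int) (pvHalf candy (k : Int) + st.2),
         pvHalf candy (k : Int)) := by
      unfold teacherAltStep
      rw [hck]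
      rfl
    rw [hval]
    have hk1 : k < st.1.length := by omega
    refine ⟨by rw [PySem.List.length_pySetD]; omega, ?_, ?_⟩
    · rw [if_neg (by omega : ¬ (k + 1 = 0)),
        show ((k + 1 : Nat) : Int) - 1 = ((k : Nat) : Int) from by push_cast; ring]
    · intro j hj
      rw [PySem.List.pyGetD_pySetD_natCast st.1 k j _ 0 hk1]
      by_cases hjk : j = k
      · subst hjk
        rw [if_pos rfl, if_pos (by omega : j < j + 1), ihprev]
      · rw [if_neg hjk, ihget j hj]
        have : (j < k + 1) ↔ (j < k) := by omega
        simp [this]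

-- pointwise value of teacher_alt for N = n > 0
lemma pv_teacher_alt_get (candy : List Int) (n : Nat) (hn : 0 < n) (hlen : n ≤ candy.length) :
    (teacher_alt (n : Int) candy).length = candy.length ∧
    ∀ j : Nat, j < candy.length →
      PySem.List.pyGetD (teacher_alt (n : Int) candy) (j : Int) 0 =
        if j < n then
          pvHalf candy (j : Int) +
            (if j = 0 then pvHalf candy ((n : Int) - 1) else pvHalf candy ((j : Int) - 1))
        else PySem.List.pyGetD candy (j : Int) 0 := by
  unfold teacher_alt
  rw [if_neg (by omega : ¬ ((n : Int) ≤ 0))]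
  obtain ⟨hlen', _, hget⟩ := pv_foldB_inv candy n hn hlen n (le_refl n)
  exact ⟨hlen', hget⟩

lemma pv_main (N : Int) (candy : List Int) (hpre : N ≤ (candy.length : Int)) :
    teacher N candy = teacher_alt N candy := by
  by_cases hN : N ≤ 0
  · have hnil : PySem.List.pyRange 0 N 1 = [] := PySem.List.pyRange_one_eq_nil hN
    unfold teacher teacher_alt teacherPhase2
    rw [hnil, if_pos hN]
    simp
  · rw [not_le] at hN
    have hNn : N = ((N.toNat : Nat) : Int) := by omega
    set n := N.toNat with hn
    have hn0 : 0 < n := by omega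
    have hlen : n ≤ candy.length := by omega
    rw [hNn]
    obtain ⟨hA, hAget⟩ := pv_teacher_get candy n hn0 hlen
    obtain ⟨hB, hBget⟩ := pv_teacher_alt_get candy n hn0 hlen
    apply List.ext_getElem (by omega)
    intro j hj1 hj2
    have hjc : j < candy.length := by omega
    have e1 := hAget j hjc
    have e2 := hBget j hjc
    rw [PySem.List.pyGetD_eq_getElem (teacher (n : Int) candy) 0 (by positivity)
      (by rw [hA]; exact_mod_cast hjc)] at e1
    rw [PySem.List.pyGetD_eq_getElem (teacher_alt (n : Int) candy) 0 (by positivity)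
      (by rw [hB]; exact_mod_cast hjc)] at e2
    simp only [Int.toNat_natCast] at e1 e2
    exact e1.trans e2.symm

-- ===== VERDICT (by name: the statement is the Claim_ definition above) =====
theorem teacher_spec : Claim_equal_teacher := by
  intro N candy _ hpre
  unfold Spec_teacher
  exact pv_main N candy (by simpa [Pre_teacher, PySem.List.len_eq] using hpre)
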